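-- pv_equiv track=rewrite | github.com/kkpdata/HB-Havens | hbhavens/io/swan.py | get_lines_per_key
-- ===== SOURCE A (Python) =====
-- def get_lines_per_key(lines):
--     """
--     Loop through swan file lines. If a line starts with a alphabet character
--     it is a key. All the subsequent lines belong to that key, and are
--     collected in a dictionary. Some keys have multiple occurences. These are
--     keys that refer to spectrum values. We add those to lists.
--
--     Parameters
--     ----------
--     lines : list
--         list with lines
--
--     Returns
--     -------
--     keydata : dictionary
--         Lines per key
--     """
--     # Initialize dictionary for lines per key and list for lines
--     keydata = {}
--     loccount = 0
--
--     key = None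
--     vals = []
--     for line in lines:
--         # Check if the first character is alphabetic
--         if line[0].isalpha():
--             # if so, check if it is an allcaps string
--             potential_key = line.split()[0]
--             if potential_key == potential_key.upper():
--                 # New key found, save values except when it is the first key
--                 if key is not None:
--                     keydata[key] = [line.strip().split() for line in vals]
--                 # Determine key and initialize list with values
--                 key = potential_key[:]
--                 vals = []
--                 if key in ['FACTOR', 'ZERO', 'NODATA']:
--                     key = 'energy_{:03d}'.format(loccount)
--                     loccount += 1
--             else:
--                 # Add values to list
--                 vals.append(line)
--         else:
--             # Add values to list
--             vals.append(line)
--     # Add to dictionary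
--     keydata[key] = [line.strip().split() for line in vals]
--
--     return keydata
-- ===== SOURCE B (Python) =====
-- def get_lines_per_key(lines):
--     def is_key(line):
--         if not line[0].isalpha():
--             return False
--         tok = line.split()[0]
--         return tok == tok.upper()
--
--     # consume lines from the front (a reversed list popped from its end is an
--     # O(1) front-consumption stack): first drop the leading lines before the
--     # first key (A discards them too)
--     rev = lines[::-1]
--     while rev and not is_key(rev[-1]):
--         rev.pop()
--
--     if not rev:
--         # no key line at all: everything under the None key, as A does
--         return {None: [l.strip().split() for l in lines]}
--
--     # cut the remainder into (raw key, body lines) segments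
--     segs = []
--     while rev:
--         name = rev.pop().split()[0]
--         body = []
--         while rev and not is_key(rev[-1]):
--             body.append(rev.pop())
--         segs.append((name, body))
--
--     # fold the segments into the dictionary, renaming the spectrum keys
--     keydata = {}
--     loccount = 0
--     for name, body in segs:
--         if name in ('FACTOR', 'ZERO', 'NODATA'):
--             name = 'energy_{:03d}'.format(loccount)
--             loccount += 1
--         keydata[name] = [l.strip().split() for l in body]
--     return keydata
-- ===== Notes on version B (the rewrite author's own statement) =====
-- stated objective: alternative
-- what changed: A threads a 4-part mutable state (dict, counter, current key, pending values) through one loop with a trailing flush; B first drops the leading non-key lines, then recursively cuts the list into (key, body) segments with take/drop-while, and finally folds the segment list into the dictionary, renaming FACTOR/ZERO/NODATA with the counter in that last pass.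
-- outside the precondition, e.g. on get_lines_per_key(['abc']): A returns {None: [['abc']]}, B returns {None: [['abc']]}
import Mathlib
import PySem

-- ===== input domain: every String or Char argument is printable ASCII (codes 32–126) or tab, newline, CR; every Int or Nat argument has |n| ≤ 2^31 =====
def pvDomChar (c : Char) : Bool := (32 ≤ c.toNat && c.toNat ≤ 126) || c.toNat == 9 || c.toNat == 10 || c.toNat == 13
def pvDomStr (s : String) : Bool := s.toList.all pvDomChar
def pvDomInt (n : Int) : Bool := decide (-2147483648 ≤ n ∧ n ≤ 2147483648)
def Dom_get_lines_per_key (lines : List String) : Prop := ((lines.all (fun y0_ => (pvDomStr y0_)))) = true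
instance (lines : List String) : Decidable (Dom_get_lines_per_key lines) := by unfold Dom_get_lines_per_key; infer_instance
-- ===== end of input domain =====

-- B re-decomposes A's single stateful loop as: drop leading non-key lines, cut the rest
-- into (key, body) segments by take/drop-while, then fold the segments into the dict
-- (objective: alternative decomposition, same cost). Same return value on Pre_.

-- shared primitives (each is one Python expression both programs use verbatim)
-- line.split()[0] (only evaluated when the line has a word, so headD "" is exact there)
def pvTok (line : String) : String := (PySem.Str.split₀ line).headD ""
-- line.strip().split()
def pvRow (line : String) : List String := PySem.Str.split₀ (PySem.Str.strip line)
-- the FACTOR/ZERO/NODATA → 'energy_{:03d}'.format(loccount) renaming with its counter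
-- ({:03d} on the nonnegative counter is exactly zfill 3 of str(n))
def pvResolve (name : String) (lc : Int) : String × Int :=
  if name == "FACTOR" || name == "ZERO" || name == "NODATA" then
    ("energy_" ++ PySem.Str.zfill (PySem.Int.toStr lc) 3, lc + 1)
  else (name, lc)

-- ===== PORT A =====
-- loop state: (keydata, loccount, key, vals)
def stepA (st : PySem.Dict String (List (List String)) × Int × Option String × List String)
    (line : String) : PySem.Dict String (List (List String)) × Int × Option String × List String :=
  let (d, lc, key?, vals) := st
  match PySem.Str.pyGet? line 0 with
  | none => (d, lc, key?, vals ++ [line])  -- Python raises IndexError on line[0]; excluded by Pre_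
  | some c =>
    if PySem.Chars.isalpha c then
      let pk := pvTok line
      if pk == PySem.Str.upper pk then
        let d' := match key? with
          | some k => d.insert k (vals.map pvRow)
          | none => d
        let (k', lc') := pvResolve pk lc
        (d', lc', some k', ([] : List String))
      else (d, lc, key?, vals ++ [line])
    else (d, lc, key?, vals ++ [line])

def get_lines_per_key (lines : List String) : List (String × List (List String)) :=
  let st := lines.foldl stepA (PySem.Dict.empty, (0 : Int), (none : Option String), ([] : List String))
  match st.2.2.1 with
  | some k => (st.1.insert k (st.2.2.2.map pvRow)).items
  | none => st.1.items  -- Python stores vals under the non-string key None here; excluded by Pre_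

-- ===== PORT B =====
def pvIsKey (line : String) : Bool :=
  match PySem.Str.pyGet? line 0 with
  | none => false  -- Python raises IndexError on line[0]; excluded by Pre_
  | some c => PySem.Chars.isalpha c && (pvTok line == PySem.Str.upper (pvTok line))

-- cut a list starting at a key line into (raw key, body lines) segments
-- (Source B consumes the lines from the front via a reversed list popped at its end;
--  here that front-consumption is the structural recursion with take/drop-while)
def segmentsB : List String → List (String × List String)
  | [] => []
  | l :: rest =>
      (pvTok l, rest.takeWhile (fun x => !pvIsKey x)) ::
        segmentsB (rest.dropWhile (fun x => !pvIsKey x))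
termination_by rest => rest.length
decreasing_by
  exact Nat.lt_succ_of_le (List.length_dropWhile_le _ _)

def stepB (st : PySem.Dict String (List (List String)) × Int) (seg : String × List String) :
    PySem.Dict String (List (List String)) × Int :=
  let (name, lc') := pvResolve seg.1 st.2
  (st.1.insert name (seg.2.map pvRow), lc')

def get_lines_per_key_alt (lines : List String) : List (String × List (List String)) :=
  let rest := lines.dropWhile (fun l => !pvIsKey l)
  if rest.isEmpty then
    []  -- Python B returns {None: …}: the non-string key None is not representable; excluded by Pre_
  else
    ((segmentsB rest).foldl stepB (PySem.Dict.empty, (0 : Int))).1.items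

-- ===== PRECONDITION & SPEC =====
-- Pre_ excludes (a) lists containing an empty line, on which A raises IndexError, and
-- (b) lists with no key line, on which A's dict carries the non-string key None,
-- a value outside the declared return type List (String × List (List String)).
def Pre_get_lines_per_key (lines : List String) : Prop :=
  ((lines.all (fun l => !(l == ""))) = true) ∧ ((lines.any pvIsKey) = true)
instance (lines : List String) : Decidable (Pre_get_lines_per_key lines) := by
  unfold Pre_get_lines_per_key; infer_instance

def pvWitness_get_lines_per_key : List String := ["LOCATION 1 2", "0.5 0.3", "FACTOR", "1.0"]

def Spec_get_lines_per_key (lines : List String) (out : List (String × List (List String))) : Prop :=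
  out = get_lines_per_key_alt lines
instance (lines : List String) (out : List (String × List (List String))) :
    Decidable (Spec_get_lines_per_key lines out) := by unfold Spec_get_lines_per_key; infer_instance

-- ===== CLAIM (what is proved, stated in full; the proofs are below) =====
def Claim_equal_get_lines_per_key : Prop := ∀ (lines : List String), Dom_get_lines_per_key lines → Pre_get_lines_per_key lines → Spec_get_lines_per_key lines (get_lines_per_key lines)

-- ===== LEMMAS AND PROOFS =====

-- A's loop over lines all of which are value lines only accumulates them into vals
theorem foldl_stepA_novals (pre : List String) :
    ∀ (d : PySem.Dict String (List (List String))) (lc : Int) (key? : Option String)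
      (vals : List String), (∀ l ∈ pre, pvIsKey l = false) →
      List.foldl stepA (d, lc, key?, vals) pre = (d, lc, key?, vals ++ pre) := by
  induction pre with
  | nil => intro d lc key? vals _; simp
  | cons l t ih =>
    intro d lc key? vals h
    have hl : pvIsKey l = false := h l (by simp)
    have ht : ∀ x ∈ t, pvIsKey x = false := fun x hx => h x (by simp [hx])
    have hstep : stepA (d, lc, key?, vals) l = (d, lc, key?, vals ++ [l]) := by
      unfold stepA
      unfold pvIsKey at hl
      cases hg : PySem.Str.pyGet? l 0 with
      | none => simp [hg]
      | some c =>
        rw [hg] at hl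
        simp only [Bool.and_eq_false_iff] at hl
        rcases hl with hl | hl
        · simp [hg, hl]
        · simp [hg, hl]
    simp only [List.foldl_cons, hstep, ih _ _ _ _ ht, List.append_assoc, List.singleton_append]

-- the finishing step of A's loop when a current key exists
def finA (st : PySem.Dict String (List (List String)) × Int × Option String × List String) :
    PySem.Dict String (List (List String)) :=
  match st.2.2.1 with
  | some k => st.1.insert k (st.2.2.2.map pvRow)
  | none => st.1

-- core invariant: A's remaining loop from state (d, lc, key k, vals) computes exactly
-- B's segment fold after flushing (k, vals ++ leading value lines)
theorem core (rest : List String) :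
    ∀ (d : PySem.Dict String (List (List String))) (lc : Int) (k : String)
      (vals : List String),
      finA (List.foldl stepA (d, lc, some k, vals) rest)
        = (List.foldl stepB
            (d.insert k ((vals ++ rest.takeWhile (fun x => !pvIsKey x)).map pvRow), lc)
            (segmentsB (rest.dropWhile (fun x => !pvIsKey x)))).1 := by
  induction rest with
  | nil => intro d lc k vals; simp [finA, segmentsB]
  | cons l t ih =>
    intro d lc k vals
    by_cases hl : pvIsKey l = true
    · -- l is a key line: flush (k, vals), start segment for l
      have hstep : stepA (d, lc, some k, vals) l
          = (d.insert k (vals.map pvRow), (pvResolve (pvTok l) lc).2,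
             some (pvResolve (pvTok l) lc).1, ([] : List String)) := by
        unfold stepA
        unfold pvIsKey at hl
        cases hg : PySem.Str.pyGet? l 0 with
        | none => rw [hg] at hl; simp at hl
        | some c =>
          rw [hg] at hl
          simp only [Bool.and_eq_true] at hl
          simp [hg, hl.1, hl.2]
      rw [List.foldl_cons, hstep,
        ih (d.insert k (vals.map pvRow)) (pvResolve (pvTok l) lc).2 (pvResolve (pvTok l) lc).1 []]
      have htw : (l :: t).takeWhile (fun x => !pvIsKey x) = [] := by
        simp [List.takeWhile_cons, hl]
      have hdw : (l :: t).dropWhile (fun x => !pvIsKey x) = l :: t := by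
        simp [List.dropWhile_cons, hl]
      rw [htw, hdw]
      show _ = (List.foldl stepB _ (segmentsB (l :: t))).1
      rw [segmentsB]
      simp only [List.foldl_cons]
      congr 2
      simp [stepB]
    · -- l is a value line: it joins vals / the pending takeWhile block
      have hl' : pvIsKey l = false := by simpa using hl
      have hstep : stepA (d, lc, some k, vals) l = (d, lc, some k, vals ++ [l]) := by
        unfold stepA
        unfold pvIsKey at hl'
        cases hg : PySem.Str.pyGet? l 0 with
        | none => simp [hg]
        | some c =>
          rw [hg] at hl'
          simp only [Bool.and_eq_false_iff] at hl'
          rcases hl' with h | h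
          · simp [hg, h]
          · simp [hg, h]
      rw [List.foldl_cons, hstep, ih d lc k (vals ++ [l])]
      have htw : (l :: t).takeWhile (fun x => !pvIsKey x)
          = l :: t.takeWhile (fun x => !pvIsKey x) := by
        simp [List.takeWhile_cons, hl']
      have hdw : (l :: t).dropWhile (fun x => !pvIsKey x)
          = t.dropWhile (fun x => !pvIsKey x) := by
        simp [List.dropWhile_cons, hl']
      rw [htw, hdw]
      simp

-- ===== VERDICT (by name: the statement is the Claim_ definition above) =====
theorem get_lines_per_key_spec : Claim_equal_get_lines_per_key := by
  intro lines _ hpre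
  unfold Spec_get_lines_per_key
  obtain ⟨-, hkey⟩ := hpre
  have hpreval : ∀ x ∈ lines.takeWhile (fun l => !pvIsKey l), pvIsKey x = false := by
    intro x hx
    have := List.mem_takeWhile_imp (l := lines) (p := fun l => !pvIsKey l) hx
    simpa using this
  have hrestne : lines.dropWhile (fun l => !pvIsKey l) ≠ [] := by
    intro hnil
    rw [List.dropWhile_eq_nil_iff] at hnil
    simp only [List.any_eq_true] at hkey
    obtain ⟨x, hx, hxk⟩ := hkey
    have := hnil x hx
    simp [hxk] at this
  obtain ⟨l, t, hlt⟩ := List.exists_cons_of_ne_nil hrestne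
  have hlkey : pvIsKey l = true := by
    have := List.head_dropWhile_not (p := fun l => !pvIsKey l) (l := lines) hrestne
    simpa [hlt] using this
  have htotal : lines = lines.takeWhile (fun l => !pvIsKey l) ++ l :: t := by
    rw [← hlt]; exact (List.takeWhile_append_dropWhile).symm
  have hstep : ∀ vals, stepA (PySem.Dict.empty, (0 : Int), none, vals) l
      = (PySem.Dict.empty, (pvResolve (pvTok l) 0).2,
         some (pvResolve (pvTok l) 0).1, ([] : List String)) := by
    intro vals
    unfold stepA
    unfold pvIsKey at hlkey
    cases hg : PySem.Str.pyGet? l 0 with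
    | none => rw [hg] at hlkey; simp at hlkey
    | some c =>
      rw [hg] at hlkey
      simp only [Bool.and_eq_true] at hlkey
      simp [hg, hlkey.1, hlkey.2]
  -- evaluate A down to finA of the loop over t
  have hA : get_lines_per_key lines
      = (finA (List.foldl stepA (PySem.Dict.empty, (pvResolve (pvTok l) 0).2,
          some (pvResolve (pvTok l) 0).1, ([] : List String)) t)).items := by
    unfold get_lines_per_key
    conv_lhs => rw [htotal]
    rw [List.foldl_append,
      foldl_stepA_novals _ PySem.Dict.empty 0 none [] hpreval, List.nil_append,
      List.foldl_cons, hstep]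
    unfold finA
    cases hfin : (List.foldl stepA (PySem.Dict.empty, (pvResolve (pvTok l) 0).2,
        some (pvResolve (pvTok l) 0).1, ([] : List String)) t).2.2.1 <;> simp [hfin]
  -- evaluate B down to the fold over the tail segments
  have hB : get_lines_per_key_alt lines
      = (List.foldl stepB
          (PySem.Dict.empty.insert (pvResolve (pvTok l) 0).1
            ((t.takeWhile (fun x => !pvIsKey x)).map pvRow), (pvResolve (pvTok l) 0).2)
          (segmentsB (t.dropWhile (fun x => !pvIsKey x)))).1.items := by
    unfold get_lines_per_key_alt
    rw [hlt]
    simp only [List.isEmpty_cons, Bool.false_eq_true, if_false]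
    rw [segmentsB, List.foldl_cons]
    have hB1 : stepB (PySem.Dict.empty, (0 : Int)) (pvTok l, t.takeWhile (fun x => !pvIsKey x))
        = (PySem.Dict.empty.insert (pvResolve (pvTok l) 0).1
            ((t.takeWhile (fun x => !pvIsKey x)).map pvRow), (pvResolve (pvTok l) 0).2) := by
      simp [stepB]
    rw [hB1]
  rw [hA, hB]
  have hcore := core t PySem.Dict.empty (pvResolve (pvTok l) 0).2 (pvResolve (pvTok l) 0).1 []
  rw [List.nil_append] at hcore
  rw [hcore]
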